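-- pv_equiv track=rewrite | github.com/Harrichael/stock-cutting | logs/create_plots.py | stepify_data
-- ===== SOURCE A (Python) =====
-- def stepify_data(ys):
--     y = []
--     for index, y_data in enumerate(ys):
--         y_data = list(y_data)
--         y_val = max(y_data)
--         if len(y) != 0 and y_val < y[-1]:
--             y_val = y[-1]
--         y.append(y_val)
--
--     return y
-- ===== SOURCE B (Python) =====
-- def stepify_data(ys):
--     ys = list(ys)
--     if not ys:
--         return []
--
--     def go(rows, cur):
--         if not rows:
--             return []
--         v = max(cur, max(rows[0]))
--         return [v] + go(rows[1:], v)
--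
--     h = max(ys[0])
--     return [h] + go(ys[1:], h)
-- ===== Notes on version B (the rewrite author's own statement) =====
-- stated objective: alternative
-- what changed: Replaces the single imperative loop that appends to a list and guards on y[-1] with a recursive decomposition: the head row's maximum seeds a structural recursion that carries the running maximum as an explicit parameter and builds the result by consing.
import Mathlib
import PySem

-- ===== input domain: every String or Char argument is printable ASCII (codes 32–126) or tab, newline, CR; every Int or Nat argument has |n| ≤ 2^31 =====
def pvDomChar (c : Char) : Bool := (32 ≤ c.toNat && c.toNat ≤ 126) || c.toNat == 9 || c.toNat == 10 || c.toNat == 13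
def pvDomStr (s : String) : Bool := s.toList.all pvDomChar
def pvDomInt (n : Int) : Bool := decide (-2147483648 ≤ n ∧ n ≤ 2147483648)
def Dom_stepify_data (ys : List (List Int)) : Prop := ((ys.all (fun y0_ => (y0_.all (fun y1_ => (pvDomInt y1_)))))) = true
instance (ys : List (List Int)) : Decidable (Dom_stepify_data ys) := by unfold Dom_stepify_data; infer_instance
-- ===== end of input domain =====

-- B replaces A's imperative append-and-guard-on-y[-1] loop by a structural recursion carrying the running maximum; objective: alternative decomposition, same cost.

-- ===== PORT A =====
def stepify_data (ys : List (List Int)) : List Int :=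
  ys.foldl (fun y y_data =>
    let y_val := (PySem.List.max? y_data (fun x => x)).getD 0   -- max(y_data); none (empty row) excluded by Pre_
    let y_val := if y.length ≠ 0 ∧ y_val < (PySem.List.pyGet? y (-1)).getD 0
                 then (PySem.List.pyGet? y (-1)).getD 0 else y_val
    y ++ [y_val]) []

-- ===== PORT B =====
def stepify_go (rows : List (List Int)) (cur : Int) : List Int :=
  match rows with
  | [] => []
  | r :: rs =>
    let v := max cur ((PySem.List.max? r (fun x => x)).getD 0)
    v :: stepify_go rs v

def stepify_data_alt (ys : List (List Int)) : List Int :=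
  match ys with
  | [] => []
  | r :: rs =>
    let h := (PySem.List.max? r (fun x => x)).getD 0
    h :: stepify_go rs h

-- ===== PRECONDITION & SPEC =====
-- Pre_ excludes inputs containing an empty row, on which Python's max([]) raises ValueError (in both A and B).
def Pre_stepify_data (ys : List (List Int)) : Prop := ∀ r ∈ ys, r ≠ []
instance (ys : List (List Int)) : Decidable (Pre_stepify_data ys) := by unfold Pre_stepify_data; infer_instance
def pvWitness_stepify_data : List (List Int) := [[1, 5], [2], [7, 3]]
def Spec_stepify_data (ys : List (List Int)) (out : List Int) : Prop := out = stepify_data_alt ys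
instance (ys : List (List Int)) (out : List Int) : Decidable (Spec_stepify_data ys out) := by unfold Spec_stepify_data; infer_instance

-- ===== CLAIM (what is proved, stated in full; the proofs are below) =====
def Claim_equal_stepify_data : Prop := ∀ (ys : List (List Int)), Dom_stepify_data ys → Pre_stepify_data ys → Spec_stepify_data ys (stepify_data ys)

-- ===== LEMMAS AND PROOFS =====

theorem stepify_fold_go (rs : List (List Int)) :
    ∀ (as_ : List Int) (c : Int),
    rs.foldl (fun y y_data =>
      let y_val := (PySem.List.max? y_data (fun x => x)).getD 0
      let y_val := if y.length ≠ 0 ∧ y_val < (PySem.List.pyGet? y (-1)).getD 0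
                   then (PySem.List.pyGet? y (-1)).getD 0 else y_val
      y ++ [y_val]) (as_ ++ [c])
    = (as_ ++ [c]) ++ stepify_go rs c := by
  induction rs with
  | nil => intro as_ c; simp [stepify_go]
  | cons r rs ih =>
    intro as_ c
    have hlast : PySem.List.pyGet? (as_ ++ [c]) (-1) = some c :=
      PySem.List.pyGet?_neg_one_append_singleton ..
    simp only [List.foldl_cons, hlast, Option.getD_some]
    set m := (PySem.List.max? r (fun x => x)).getD 0 with hm
    have hv : (if (as_ ++ [c]).length ≠ 0 ∧ m < c then c else m) = max c m := by
      simp; omega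
    rw [hv]
    have := ih (as_ ++ [c]) (max c m)
    rw [show (as_ ++ [c]) ++ [max c m] = (as_ ++ [c] ++ [max c m]) by simp] at this ⊢
    rw [this]
    simp [stepify_go, hm]

-- ===== VERDICT (by name: the statement is the Claim_ definition above) =====
theorem stepify_data_spec : Claim_equal_stepify_data := by
  intro ys _ _
  unfold Spec_stepify_data stepify_data stepify_data_alt
  cases ys with
  | nil => simp
  | cons r rs =>
    simp only [List.foldl_cons]
    have h1 : (PySem.List.pyGet? ([] : List Int) (-1)).getD 0 = 0 := by decide
    simp only [List.length_nil, ne_eq, not_true_eq_false, false_and, if_false, List.nil_append]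
    have := stepify_fold_go rs [] ((PySem.List.max? r (fun x => x)).getD 0)
    simpa using this
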